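-- pv_equiv track=rewrite | github.com/DNAi-inc/DNHealth | src/dnhealth/dnhealth_fhir/r5_generator/type_mapper.py | format_imports
-- ===== SOURCE A (Python) =====
-- from typing import Dict, List, Optional, Set, Tuple
--
-- def format_imports(imports: Set[str]) -> str:
--     """
--     Format import statements as a string, deduplicating and grouping imports.
--
--     Args:
--         imports: Set of import statements
--
--     Returns:
--         Formatted import string with deduplicated imports
--     """
--     # Group imports by module to avoid duplicates
--     from_imports: Dict[str, Set[str]] = {}  # module -> set of names
--     other_imports: List[str] = []  # Other import types (e.g., "import X")
--
--     for imp in imports: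
--         if imp.startswith("from "):
--             # Parse "from module import name" or "from module import name1, name2"
--             parts = imp.split(" import ", 1)
--             if len(parts) == 2:
--                 module = parts[0].replace("from ", "").strip()
--                 names_str = parts[1].strip()
--                 # Handle multiple names: "name1, name2"
--                 names = [n.strip() for n in names_str.split(",")]
--
--                 if module not in from_imports:
--                     from_imports[module] = set()
--                 from_imports[module].update(names)
--             else:
--                 other_imports.append(imp)
--         else:
--             other_imports.append(imp)
--
--     # Build import lines
--     import_lines = []
--
--     # Format grouped imports: "from module import name1, name2"
--     for module in sorted(from_imports.keys()):
--         names = sorted(from_imports[module])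
--         if len(names) == 1:
--             import_lines.append(f"from {module} import {names[0]}")
--         else:
--             # Single line format: "from module import name1, name2, name3"
--             import_lines.append(f"from {module} import {', '.join(names)}")
--
--     # Add other imports
--     import_lines.extend(sorted(other_imports))
--
--     return "\n".join(import_lines)
-- ===== SOURCE B (Python) =====
-- def _parse(imp):
--     """Return the list of (module, name) pairs of a well-formed 'from' import, else None."""
--     if imp.startswith("from "):
--         parts = imp.split(" import ", 1)
--         if len(parts) == 2:
--             module = parts[0].replace("from ", "").strip()
--             return [(module, n.strip()) for n in parts[1].strip().split(",")]
--     return None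
--
--
-- def format_imports(imports):
--     """
--     Format import statements as a string, deduplicating and grouping imports.
--
--     Staged-pass decomposition: parse every import once with a helper, derive the
--     flat (module, name) pair list and the other-imports list by comprehension,
--     then render each sorted distinct module by filtering its names out of the
--     pair list.  No dict accumulator and no stateful loop.
--     """
--     parsed = [(_parse(i), i) for i in imports]
--     pairs = [p for res, _ in parsed if res is not None for p in res]
--     others = sorted(i for res, i in parsed if res is None)
--     lines = [
--         "from {} import {}".format(
--             m, ", ".join(sorted({n for mm, n in pairs if mm == m}))
--         )
--         for m in sorted({m for m, _ in pairs})
--     ]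
--     return "\n".join(lines + others)
-- ===== Notes on version B (the rewrite author's own statement) =====
-- stated objective: alternative
-- what changed: A accumulates a dict of module->name-set and an others list in one stateful loop; B has no loop state at all: a parse helper maps each import to its (module, name) pairs or None, and staged comprehensions derive the flat pair list, the others list, and each sorted group by filtering the pair list per sorted distinct module.
import Mathlib
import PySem

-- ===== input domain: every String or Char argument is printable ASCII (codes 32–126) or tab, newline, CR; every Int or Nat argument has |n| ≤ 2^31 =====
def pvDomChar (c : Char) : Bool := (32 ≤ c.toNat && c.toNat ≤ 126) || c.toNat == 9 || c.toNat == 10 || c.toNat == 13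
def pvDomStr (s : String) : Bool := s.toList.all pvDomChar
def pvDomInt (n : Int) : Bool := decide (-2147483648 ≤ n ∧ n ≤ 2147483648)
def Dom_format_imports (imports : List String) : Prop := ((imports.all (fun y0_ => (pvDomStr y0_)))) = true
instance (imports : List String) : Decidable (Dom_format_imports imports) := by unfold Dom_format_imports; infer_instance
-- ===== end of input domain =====

-- B replaces A's stateful dict-of-sets loop by a stateless staged computation: a parse helper
-- maps each import to its (module, name) pairs or none, and comprehensions derive the groups
-- by filtering the flat pair list (objective: alternative decomposition, same cost).

-- ===== PORT A =====
-- state: (from_imports : dict module -> set of names, other_imports)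
def format_imports (imports : List String) : String :=
  let st := imports.foldl
    (fun (st : PySem.Dict String (PySem.Set String) × List String) imp =>
      if PySem.Str.startswith imp "from " then
        let parts := (PySem.Str.splitMax? imp " import " 1).getD []
        if parts.length == 2 then
          let module := PySem.Str.strip (PySem.Str.replace (parts.getD 0 "") "from " "")
          let names_str := PySem.Str.strip (parts.getD 1 "")
          let names := ((PySem.Str.split? names_str ",").getD []).map (fun n => PySem.Str.strip n)
          let fi := if st.1.contains module then st.1 else st.1.insert module PySem.Set.empty
          (fi.modify module PySem.Set.empty (fun s => PySem.Set.update s names), st.2)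
        else (st.1, st.2 ++ [imp])
      else (st.1, st.2 ++ [imp]))
    (PySem.Dict.empty, [])
  let import_lines := (PySem.List.sorted st.1.keys (fun x => x) false).foldl
    (fun acc module =>
      let names := PySem.List.sorted (st.1.getD module PySem.Set.empty) (fun x => x) false
      if names.length == 1 then
        acc ++ ["from " ++ module ++ " import " ++ names.getD 0 ""]
      else
        acc ++ ["from " ++ module ++ " import " ++ PySem.Str.join ", " names]) []
  PySem.Str.join "\n" (import_lines ++ PySem.List.sorted st.2 (fun x => x) false)

-- ===== PORT B =====
-- _parse: the pair list of a well-formed "from" import, else none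
def pvParse (imp : String) : Option (List (String × String)) :=
  if PySem.Str.startswith imp "from " then
    let parts := (PySem.Str.splitMax? imp " import " 1).getD []
    if parts.length == 2 then
      let module := PySem.Str.strip (PySem.Str.replace (parts.getD 0 "") "from " "")
      some ((((PySem.Str.split? (PySem.Str.strip (parts.getD 1 "")) ",").getD []).map
        (fun n => PySem.Str.strip n)).map (fun n => (module, n)))
    else none
  else none

def format_imports_alt (imports : List String) : String :=
  let pairs := imports.flatMap (fun i => (pvParse i).getD [])
  let others := PySem.List.sorted (imports.filter (fun i => (pvParse i).isNone)) (fun x => x) false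
  let lines := (PySem.List.sorted (PySem.Set.ofList (pairs.map Prod.fst)) (fun x => x) false).map
    (fun m => "from " ++ m ++ " import " ++
      PySem.Str.join ", " (PySem.List.sorted
        (PySem.Set.ofList ((pairs.filter (fun p => p.1 == m)).map Prod.snd)) (fun x => x) false))
  PySem.Str.join "\n" (lines ++ others)

-- ===== PRECONDITION & SPEC =====
def Spec_format_imports (imports : List String) (out : String) : Prop := out = format_imports_alt imports
instance (imports : List String) (out : String) : Decidable (Spec_format_imports imports out) := by unfold Spec_format_imports; infer_instance

-- ===== CLAIM (what is proved, stated in full; the proofs are below) =====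
def Claim_equal_format_imports : Prop := ∀ (imports : List String), Dom_format_imports imports → Spec_format_imports imports (format_imports imports)

-- ===== LEMMAS AND PROOFS =====

-- shared parsing pieces of both programs
def pvParts (imp : String) : List String := (PySem.Str.splitMax? imp " import " 1).getD []
def pvOk (imp : String) : Bool := PySem.Str.startswith imp "from " && (pvParts imp).length == 2
def pvMod (imp : String) : String := PySem.Str.strip (PySem.Str.replace ((pvParts imp).getD 0 "") "from " "")
def pvNames (imp : String) : List String :=
  ((PySem.Str.split? (PySem.Str.strip ((pvParts imp).getD 1 "")) ",").getD []).map (fun n => PySem.Str.strip n)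
-- A's dict-building step on one "from" import
def pvStep (d : PySem.Dict String (PySem.Set String)) (e : String) : PySem.Dict String (PySem.Set String) :=
  (if d.contains (pvMod e) then d else d.insert (pvMod e) PySem.Set.empty).modify
    (pvMod e) PySem.Set.empty (fun s => PySem.Set.update s (pvNames e))

theorem pvParse_eq (imp : String) :
    pvParse imp = if pvOk imp then some ((pvNames imp).map (fun n => (pvMod imp, n))) else none := by
  unfold pvParse
  by_cases h1 : PySem.Str.startswith imp "from "
  · rw [if_pos h1]
    dsimp only
    by_cases h2 : (((PySem.Str.splitMax? imp " import " 1).getD []).length == 2) = true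
    · rw [if_pos h2]
      have hok : pvOk imp = true := by simp only [pvOk, pvParts, h1, h2, Bool.and_self]
      rw [hok, if_pos rfl]
      simp [pvNames, pvMod, pvParts]
    · rw [if_neg h2]
      have hok : pvOk imp = false := by
        simp only [pvOk, pvParts, h1, Bool.true_and]
        simpa using h2
      rw [hok]
      simp
  · rw [if_neg h1]
    have hok : pvOk imp = false := by
      simp only [pvOk, pvParts, Bool.and_eq_false_iff]
      left; simpa using h1
    rw [hok]
    simp

theorem pv_go_ne_nil (sep : List Char) (fuel : Nat) (l cur : List Char) (acc : List (List Char)) :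
    PySem.Chars.splitOn.go sep fuel l cur acc ≠ [] := by
  induction fuel generalizing l cur acc with
  | zero => simp [PySem.Chars.splitOn.go]
  | succ n ih =>
    cases l with
    | nil => simp [PySem.Chars.splitOn.go]
    | cons c rest =>
      rw [PySem.Chars.splitOn.go]
      split
      · exact ih _ _ _
      · exact ih _ _ _

theorem pvNames_ne_nil (imp : String) : pvNames imp ≠ [] := by
  unfold pvNames
  simp [PySem.Str.split?, PySem.Chars.split?, PySem.Chars.splitOn]
  exact pv_go_ne_nil _ _ _ _ _

theorem pv_step_keys (d : PySem.Dict String (PySem.Set String)) (e : String) :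
    (pvStep d e).keys = PySem.Set.add d.keys (pvMod e) := by
  unfold pvStep
  by_cases h : d.contains (pvMod e)
  · rw [if_pos h, PySem.Dict.keys_modify, PySem.Dict.keys_insert_of_contains _ _ h,
      PySem.Set.add_of_mem ((PySem.Dict.contains_iff_mem_keys _ _).mp h)]
  · have h' : d.contains (pvMod e) = false := by simpa using h
    rw [if_neg h, PySem.Dict.keys_modify, PySem.Dict.keys_insert_of_contains _ _
      (PySem.Dict.contains_insert_self _ _ _), PySem.Dict.keys_insert_of_not_contains _ _ h',
      PySem.Set.add_of_not_mem (fun hm => h ((PySem.Dict.contains_iff_mem_keys _ _).mpr hm))]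

theorem pv_keys_foldl (l : List String) (d : PySem.Dict String (PySem.Set String)) :
    (l.foldl pvStep d).keys = PySem.Set.update d.keys (l.map pvMod) := by
  induction l generalizing d with
  | nil => simp [PySem.Set.update]
  | cons e t ih => simp [List.foldl_cons, ih, pv_step_keys, PySem.Set.update_cons]

theorem pv_step_getD (d : PySem.Dict String (PySem.Set String)) (e : String) (m : String) :
    (pvStep d e).getD m PySem.Set.empty =
      if pvMod e == m then PySem.Set.update (d.getD m PySem.Set.empty) (pvNames e)
      else d.getD m PySem.Set.empty := by
  unfold pvStep
  by_cases hm : pvMod e = m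
  · subst hm
    simp only [beq_self_eq_true, if_true]
    by_cases h : d.contains (pvMod e)
    · rw [if_pos h, PySem.Dict.getD_modify_self]
    · have h' : d.contains (pvMod e) = false := by simpa using h
      rw [if_neg h, PySem.Dict.getD_modify_self, PySem.Dict.getD_insert_self,
        PySem.Dict.getD_of_not_contains _ _ h']
  · have hbeq : (pvMod e == m) = false := by simpa using hm
    rw [hbeq, if_neg Bool.false_ne_true]
    by_cases h : d.contains (pvMod e)
    · rw [if_pos h, PySem.Dict.getD_modify_of_ne _ _ _ (Ne.symm hm)]
    · rw [if_neg h, PySem.Dict.getD_modify_of_ne _ _ _ (Ne.symm hm),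
        PySem.Dict.getD_insert_of_ne _ _ _ (Ne.symm hm)]

theorem pv_getD_foldl (l : List String) (d : PySem.Dict String (PySem.Set String)) (m : String) :
    (l.foldl pvStep d).getD m PySem.Set.empty =
      PySem.Set.update (d.getD m PySem.Set.empty) ((l.filter (fun e => pvMod e == m)).flatMap pvNames) := by
  induction l generalizing d with
  | nil => simp [PySem.Set.update]
  | cons e t ih =>
    simp only [List.foldl_cons, ih, List.filter_cons]
    by_cases h : (pvMod e == m) = true
    · rw [if_pos h, pv_step_getD, if_pos h]
      simp [PySem.Set.update_append]
    · rw [if_neg h, pv_step_getD, if_neg h]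

theorem pv_filter_pairs (l : List String) (m : String) :
    ((l.flatMap (fun e => (pvNames e).map (fun n => (pvMod e, n)))).filter (fun p => p.1 == m)).map Prod.snd
      = (l.filter (fun e => pvMod e == m)).flatMap pvNames := by
  induction l with
  | nil => simp
  | cons e t ih =>
    by_cases h : (pvMod e == m) = true
    · simp only [List.flatMap_cons, List.filter_append, List.map_append, ih, List.filter_cons, h,
        if_true, List.filter_map]
      have hc : (fun (p : String × String) => p.1 == m) ∘ (fun n => (pvMod e, n)) = fun _ => true := by
        funext n; simp [h]
      rw [hc, List.filter_true, List.map_map]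
      simp
    · simp only [List.flatMap_cons, List.filter_append, List.map_append, ih, List.filter_cons, h,
        List.filter_map]
      have hc : (fun (p : String × String) => p.1 == m) ∘ (fun n => (pvMod e, n)) = fun _ => false := by
        funext n; simpa using h
      rw [hc, List.filter_false]
      simp

theorem pv_mods_perm (l : List String) :
    (PySem.Set.ofList ((l.flatMap (fun e => (pvNames e).map (fun n => (pvMod e, n)))).map Prod.fst)).Perm
      (PySem.Set.ofList (l.map pvMod)) := by
  apply (List.perm_ext_iff_of_nodup (PySem.Set.nodup_ofList _) (PySem.Set.nodup_ofList _)).mpr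
  intro m
  simp only [PySem.Set.mem_ofList, List.mem_map, List.mem_flatMap]
  constructor
  · rintro ⟨⟨m', n⟩, ⟨e, he, n', hn', heq⟩, rfl⟩
    exact ⟨e, he, ((Prod.mk.injEq _ _ _ _).mp heq).1⟩
  · rintro ⟨e, he, rfl⟩
    obtain ⟨n, hn⟩ := List.exists_mem_of_ne_nil _ (pvNames_ne_nil e)
    exact ⟨(pvMod e, n), ⟨e, he, n, hn, rfl⟩, rfl⟩

theorem pv_join_singleton (x : String) : PySem.Str.join ", " [x] = x := by
  simp [PySem.Str.join, PySem.Chars.join_singleton]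

theorem pv_A_fold (l : List String) (d : PySem.Dict String (PySem.Set String)) (o : List String) :
    l.foldl
      (fun (st : PySem.Dict String (PySem.Set String) × List String) imp =>
        if PySem.Str.startswith imp "from " then
          let parts := (PySem.Str.splitMax? imp " import " 1).getD []
          if parts.length == 2 then
            let module := PySem.Str.strip (PySem.Str.replace (parts.getD 0 "") "from " "")
            let names_str := PySem.Str.strip (parts.getD 1 "")
            let names := ((PySem.Str.split? names_str ",").getD []).map (fun n => PySem.Str.strip n)
            let fi := if st.1.contains module then st.1 else st.1.insert module PySem.Set.empty
            (fi.modify module PySem.Set.empty (fun s => PySem.Set.update s names), st.2)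
          else (st.1, st.2 ++ [imp])
        else (st.1, st.2 ++ [imp]))
      (d, o)
    = ((l.filter pvOk).foldl pvStep d, o ++ l.filter (fun i => !pvOk i)) := by
  induction l generalizing d o with
  | nil => simp
  | cons e t ih =>
    rw [List.foldl_cons]
    by_cases h1 : PySem.Str.startswith e "from "
    · rw [if_pos h1]
      dsimp only
      by_cases h2 : (((PySem.Str.splitMax? e " import " 1).getD []).length == 2) = true
      · have hok : pvOk e = true := by
          simp only [pvOk, pvParts, h1, h2, Bool.and_self]
        rw [if_pos h2, ih, List.filter_cons, List.filter_cons, hok]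
        simp [pvStep, pvMod, pvNames, pvParts]
      · have hok : pvOk e = false := by
          simp only [pvOk, pvParts, h1, Bool.true_and]
          simpa using h2
        rw [if_neg h2, ih, List.filter_cons, List.filter_cons, hok]
        simp
    · have hok : pvOk e = false := by
        simp only [pvOk, pvParts, Bool.and_eq_false_iff]
        left; simpa using h1
      rw [if_neg h1, ih, List.filter_cons, List.filter_cons, hok]
      simp

theorem pv_B_pairs (l : List String) :
    l.flatMap (fun i => (pvParse i).getD [])
      = (l.filter pvOk).flatMap (fun e => (pvNames e).map (fun n => (pvMod e, n))) := by
  induction l with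
  | nil => simp
  | cons e t ih =>
    rw [List.flatMap_cons, List.filter_cons, ih, pvParse_eq]
    by_cases h : pvOk e
    · rw [if_pos h, if_pos h, List.flatMap_cons, Option.getD_some]
    · rw [if_neg h, if_neg h, Option.getD_none, List.nil_append]

theorem pv_B_others (l : List String) :
    l.filter (fun i => (pvParse i).isNone) = l.filter (fun i => !pvOk i) := by
  apply List.filter_congr
  intro i _
  rw [pvParse_eq]
  by_cases h : pvOk i
  · simp [h]
  · simp [h]

theorem pv_render_fold (d : PySem.Dict String (PySem.Set String)) (ms : List String) :
    ms.foldl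
      (fun acc module =>
        let names := PySem.List.sorted (d.getD module PySem.Set.empty) (fun x => x) false
        if names.length == 1 then
          acc ++ ["from " ++ module ++ " import " ++ names.getD 0 ""]
        else
          acc ++ ["from " ++ module ++ " import " ++ PySem.Str.join ", " names]) []
    = ms.map (fun module => "from " ++ module ++ " import " ++
        PySem.Str.join ", " (PySem.List.sorted (d.getD module PySem.Set.empty) (fun x => x) false)) := by
  have h := PySem.List.foldl_congr_mem
    (l := ms) (init := ([] : List String))
    (f := fun acc module =>
      let names := PySem.List.sorted (d.getD module PySem.Set.empty) (fun x => x) false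
      if names.length == 1 then
        acc ++ ["from " ++ module ++ " import " ++ names.getD 0 ""]
      else
        acc ++ ["from " ++ module ++ " import " ++ PySem.Str.join ", " names])
    (g := fun acc module => acc ++ ["from " ++ module ++ " import " ++
      PySem.Str.join ", " (PySem.List.sorted (d.getD module PySem.Set.empty) (fun x => x) false)])
    (by
      intro acc m _
      dsimp only
      by_cases h : (PySem.List.sorted (d.getD m PySem.Set.empty) (fun x => x) false).length == 1
      · rw [if_pos h]
        have hlen : (PySem.List.sorted (d.getD m PySem.Set.empty) (fun x => x) false).length = 1 := by
          simpa using h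
        obtain ⟨x, hx⟩ := List.length_eq_one_iff.mp hlen
        rw [hx, pv_join_singleton]
        rfl
      · rw [if_neg (by simpa using h)])
  rw [h, PySem.List.foldl_append_singleton_eq_map, List.nil_append]

-- ===== VERDICT (by name: the statement is the Claim_ definition above) =====
theorem format_imports_spec : Claim_equal_format_imports := by
  intro imports _
  unfold Spec_format_imports format_imports format_imports_alt
  rw [pv_A_fold, pv_B_pairs, pv_B_others]
  dsimp only
  rw [pv_render_fold, List.nil_append]
  congr 1
  congr 1
  have hkeys : PySem.List.sorted
        (PySem.Set.ofList (((imports.filter pvOk).flatMap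
          (fun e => (pvNames e).map (fun n => (pvMod e, n)))).map Prod.fst)) (fun x => x) false
      = PySem.List.sorted (((imports.filter pvOk).foldl pvStep PySem.Dict.empty).keys)
          (fun x => x) false := by
    rw [pv_keys_foldl]
    have he : (PySem.Dict.empty : PySem.Dict String (PySem.Set String)).keys = PySem.Set.empty := rfl
    rw [he, PySem.Set.update_empty]
    exact (PySem.List.sorted_id_eq_sorted_id_iff_perm _ _).mpr (pv_mods_perm _)
  rw [← hkeys]
  apply List.map_congr_left
  intro m _
  have hval : ((imports.filter pvOk).foldl pvStep PySem.Dict.empty).getD m PySem.Set.empty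
      = PySem.Set.ofList ((((imports.filter pvOk).flatMap
          (fun e => (pvNames e).map (fun n => (pvMod e, n)))).filter
            (fun p => p.1 == m)).map Prod.snd) := by
    rw [pv_getD_foldl, pv_filter_pairs]
    have he : (PySem.Dict.empty : PySem.Dict String (PySem.Set String)).getD m PySem.Set.empty
        = PySem.Set.empty := rfl
    rw [he, PySem.Set.update_empty]
  rw [hval]
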